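-- pv_equiv track=rewrite | github.com/tobiasduerschmid/tobiasduerschmid.github.io | scripts/md_to_latex.py | build_nested_itemize
-- ===== SOURCE A (Python) =====
-- def build_nested_itemize(items):
--     """
--     items: list of [level, latex_text] pairs (level is 0-based int).
--     Emits properly nested \\begin{itemize} … \\end{itemize}.
--     """
--     output = []
--     stack = []
--
--     def close_to(target):
--         while stack and stack[-1] > target:
--             output.append('\\end{itemize}')
--             stack.pop()
--
--     for level, text in items:
--         if not stack:
--             output.append('\\begin{itemize}')
--             stack.append(level)
--         elif level > stack[-1]:
--             output.append('\\begin{itemize}')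
--             stack.append(level)
--         elif level < stack[-1]:
--             close_to(level)
--             if not stack or stack[-1] != level:
--                 output.append('\\begin{itemize}')
--                 stack.append(level)
--         output.append(f'\\item {text}')
--
--     while stack:
--         output.append('\\end{itemize}')
--         stack.pop()
--
--     return '\n'.join(output)
-- ===== SOURCE B (Python) =====
-- def build_nested_itemize(items):
--     """
--     items: list of [level, latex_text] pairs (level is 0-based int).
--     Emits properly nested \\begin{itemize} ... \\end{itemize}.
--     Recursive decomposition: a block is rendered recursively, returning the
--     lines it produced together with the items it did not consume.
--     """
--     def block(key, rest):
--         # renders the body (after the first item) of an open block with key `key`;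
--         # returns (lines including the closing \end, remaining items)
--         if not rest:
--             return ['\\end{itemize}'], []
--         lvl, text = rest[0]
--         if lvl == key:
--             lines, rem = block(key, rest[1:])
--             return ['\\item ' + text] + lines, rem
--         if lvl > key:
--             sub, rem = block(lvl, rest[1:])
--             cont, rem2 = block(key, rem)
--             return ['\\begin{itemize}', '\\item ' + text] + sub + cont, rem2
--         return ['\\end{itemize}'], rest
--
--     def top(rest):
--         if not rest:
--             return []
--         lvl, text = rest[0]
--         sub, rem = block(lvl, rest[1:])
--         return ['\\begin{itemize}', '\\item ' + text] + sub + top(rem)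
--
--     return '\n'.join(top(items))
-- ===== Notes on version B (the rewrite author's own statement) =====
-- stated objective: alternative
-- what changed: Replaces the imperative stack + close_to while-loop with a recursive descent that renders each itemize block as a self-contained recursive call returning its lines and the unconsumed items.
import Mathlib
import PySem

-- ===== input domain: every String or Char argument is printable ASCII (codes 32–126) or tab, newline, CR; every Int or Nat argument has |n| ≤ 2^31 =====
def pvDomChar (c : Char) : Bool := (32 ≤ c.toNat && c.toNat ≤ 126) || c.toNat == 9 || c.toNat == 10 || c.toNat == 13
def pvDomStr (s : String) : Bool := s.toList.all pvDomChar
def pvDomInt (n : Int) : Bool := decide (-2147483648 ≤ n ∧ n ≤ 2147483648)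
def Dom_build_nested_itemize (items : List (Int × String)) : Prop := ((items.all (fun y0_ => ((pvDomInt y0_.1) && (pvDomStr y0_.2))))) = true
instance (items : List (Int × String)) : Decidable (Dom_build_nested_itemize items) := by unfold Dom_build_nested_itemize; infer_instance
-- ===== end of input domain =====

-- B replaces A's explicit stack + close_to loop by a recursive block renderer
-- (objective: alternative decomposition, similar cost).

-- ===== PORT A =====
-- the inner while loop of close_to: pops stack entries > target, emitting \end each time
def pvCloseTo (target : Int) (out : List String) (stack : List Int) : List String × List Int :=
  match stack with
  | [] => (out, [])
  | top :: rest =>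
    if top > target then pvCloseTo target (out ++ ["\\end{itemize}"]) rest
    else (out, top :: rest)

-- the 'level < stack[-1]' branch of A's loop body (close_to, conditional begin, item)
def pvStepLow (level : Int) (text : String) (out : List String) (stack : List Int) :
    List String × List Int :=
  match pvCloseTo level out stack with
  | (out', []) => (out' ++ ["\\begin{itemize}", "\\item " ++ text], [level])
  | (out', t :: r) =>
    if t ≠ level then (out' ++ ["\\begin{itemize}", "\\item " ++ text], level :: t :: r)
    else (out' ++ ["\\item " ++ text], t :: r)

-- one iteration of A's for loop over (output, stack)
def pvStepA (st : List String × List Int) (it : Int × String) : List String × List Int :=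
  match st, it with
  | (out, stack), (level, text) =>
    match stack with
    | [] => (out ++ ["\\begin{itemize}", "\\item " ++ text], [level])
    | top :: rest =>
      if level > top then (out ++ ["\\begin{itemize}", "\\item " ++ text], level :: top :: rest)
      else if level < top then pvStepLow level text out (top :: rest)
      else (out ++ ["\\item " ++ text], top :: rest)

-- the trailing 'while stack' loop
def pvCloseAll (st : List String × List Int) : List String :=
  match st with
  | (out, []) => out
  | (out, _ :: rest) => pvCloseAll (out ++ ["\\end{itemize}"], rest)
termination_by st.2.length
decreasing_by simp

def build_nested_itemize (items : List (Int × String)) : String :=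
  PySem.Str.join "\n" (pvCloseAll (items.foldl pvStepA ([], [])))

-- ===== PORT B =====
-- body of an open block with key `key`: returns (lines incl. the closing \end, unconsumed items);
-- the subtype bound on the remainder is only the termination measure, matching Source B's `block`.
def pvBlock (key : Int) : (rest : List (Int × String)) →
    List String × { r : List (Int × String) // r.length ≤ rest.length }
  | [] => (["\\end{itemize}"], ⟨[], Nat.le_refl _⟩)
  | (lvl, text) :: rs =>
    if lvl = key then
      let res := pvBlock key rs
      (("\\item " ++ text) :: res.1, ⟨res.2.1, Nat.le_succ_of_le res.2.2⟩)
    else if lvl > key then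
      let res := pvBlock lvl rs
      let res2 := pvBlock key res.2.1
      ("\\begin{itemize}" :: ("\\item " ++ text) :: (res.1 ++ res2.1),
        ⟨res2.2.1, Nat.le_succ_of_le (Nat.le_trans res2.2.2 res.2.2)⟩)
    else (["\\end{itemize}"], ⟨(lvl, text) :: rs, Nat.le_refl _⟩)
termination_by rest => rest.length
decreasing_by
  · simp
  · simp
  · exact Nat.lt_succ_of_le res.2.2

-- Source B's `top`: successive sibling top-level blocks
def pvTop : (rest : List (Int × String)) → List String
  | [] => []
  | (lvl, text) :: rs =>
    let res := pvBlock lvl rs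
    "\\begin{itemize}" :: ("\\item " ++ text) :: (res.1 ++ pvTop res.2.1)
termination_by rest => rest.length
decreasing_by exact Nat.lt_succ_of_le res.2.2

def build_nested_itemize_alt (items : List (Int × String)) : String :=
  PySem.Str.join "\n" (pvTop items)

-- ===== PRECONDITION & SPEC =====
def Spec_build_nested_itemize (items : List (Int × String)) (out : String) : Prop := out = build_nested_itemize_alt items
instance (items : List (Int × String)) (out : String) : Decidable (Spec_build_nested_itemize items out) := by unfold Spec_build_nested_itemize; infer_instance

-- ===== CLAIM (what is proved, stated in full; the proofs are below) =====
def Claim_equal_build_nested_itemize : Prop := ∀ (items : List (Int × String)), Dom_build_nested_itemize items → Spec_build_nested_itemize items (build_nested_itemize items)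

-- ===== LEMMAS AND PROOFS =====

-- B's pending-continuations view of A's stack: the lines still to be emitted when the
-- open blocks have keys `s` (top first) and the remaining items are `l`.
def pvChain : List Int → List (Int × String) → List String
  | [], l => pvTop l
  | k :: ks, l => (pvBlock k l).1 ++ pvChain ks (pvBlock k l).2.1

lemma pvCloseAll_eq (s : List Int) : ∀ out, pvCloseAll (out, s) = out ++ pvChain s [] := by
  induction s with
  | nil => intro out; simp [pvCloseAll, pvChain, pvTop]
  | cons k ks ih =>
    intro out
    simp only [pvCloseAll, ih, pvChain, pvBlock]
    simp

lemma pvLow (lvl : Int) (text : String) (rest : List (Int × String))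
    (IH : ∀ (s' : List Int) (out' : List String),
      pvCloseAll (List.foldl pvStepA (out', s') rest) = out' ++ pvChain s' rest) :
    ∀ (s : List Int) (out : List String),
      pvCloseAll (List.foldl pvStepA (pvStepLow lvl text out s) rest)
        = out ++ pvChain s ((lvl, text) :: rest) := by
  intro s
  induction s with
  | nil =>
    intro out
    simp only [pvStepLow, pvCloseTo, IH, pvChain, pvTop]
    simp
  | cons k ks ih =>
    intro out
    rcases lt_trichotomy lvl k with hlt | heq | hgt
    · have h1 : pvStepLow lvl text out (k :: ks) = pvStepLow lvl text (out ++ ["\\end{itemize}"]) ks := by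
        simp [pvStepLow, pvCloseTo, hlt]
      have h2 : pvChain (k :: ks) ((lvl, text) :: rest)
          = "\\end{itemize}" :: pvChain ks ((lvl, text) :: rest) := by
        have hne : ¬ lvl = k := by omega
        have hng : ¬ lvl > k := by omega
        simp [pvChain, pvBlock, hne, hng]
      rw [h1, ih, h2]; simp
    · subst heq
      have h1 : pvStepLow lvl text out (lvl :: ks) = (out ++ ["\\item " ++ text], lvl :: ks) := by
        simp [pvStepLow, pvCloseTo]
      have h2 : pvChain (lvl :: ks) ((lvl, text) :: rest)
          = ("\\item " ++ text) :: pvChain (lvl :: ks) rest := by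
        simp [pvChain, pvBlock]
      rw [h1, IH, h2]; simp
    · have h1 : pvStepLow lvl text out (k :: ks)
          = (out ++ ["\\begin{itemize}", "\\item " ++ text], lvl :: k :: ks) := by
        have hne : k ≠ lvl := by omega
        have hng : ¬ k > lvl := by omega
        simp [pvStepLow, pvCloseTo, hng, hne]
      have h2 : pvChain (k :: ks) ((lvl, text) :: rest)
          = "\\begin{itemize}" :: ("\\item " ++ text) :: pvChain (lvl :: k :: ks) rest := by
        have hne : ¬ lvl = k := by omega
        simp [pvChain, pvBlock, hne, hgt]
      rw [h1, IH, h2]; simp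
    
lemma pvMain : ∀ (l : List (Int × String)) (s : List Int) (out : List String),
    pvCloseAll (List.foldl pvStepA (out, s) l) = out ++ pvChain s l := by
  intro l
  induction l with
  | nil => intro s out; simpa using pvCloseAll_eq s out
  | cons it rest ih =>
    rcases it with ⟨lvl, text⟩
    intro s out
    cases s with
    | nil =>
      have h1 : pvStepA (out, []) (lvl, text)
          = (out ++ ["\\begin{itemize}", "\\item " ++ text], [lvl]) := by
        simp [pvStepA]
      have h2 : pvChain [] ((lvl, text) :: rest)
          = "\\begin{itemize}" :: ("\\item " ++ text) :: pvChain [lvl] rest := by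
        simp [pvChain, pvTop]
      simp only [List.foldl_cons, h1, ih, h2]; simp
    | cons k ks =>
      rcases lt_trichotomy lvl k with hlt | heq | hgt
      · have h1 : pvStepA (out, k :: ks) (lvl, text) = pvStepLow lvl text out (k :: ks) := by
          have hng : ¬ lvl > k := by omega
          simp [pvStepA, hng, hlt]
        simp only [List.foldl_cons, h1]
        exact pvLow lvl text rest ih (k :: ks) out
      · subst heq
        have h1 : pvStepA (out, lvl :: ks) (lvl, text) = (out ++ ["\\item " ++ text], lvl :: ks) := by
          simp [pvStepA]
        have h2 : pvChain (lvl :: ks) ((lvl, text) :: rest)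
            = ("\\item " ++ text) :: pvChain (lvl :: ks) rest := by
          simp [pvChain, pvBlock]
        simp only [List.foldl_cons, h1, ih, h2]; simp
      · have h1 : pvStepA (out, k :: ks) (lvl, text)
            = (out ++ ["\\begin{itemize}", "\\item " ++ text], lvl :: k :: ks) := by
          simp [pvStepA, hgt]
        have h2 : pvChain (k :: ks) ((lvl, text) :: rest)
            = "\\begin{itemize}" :: ("\\item " ++ text) :: pvChain (lvl :: k :: ks) rest := by
          have hne : ¬ lvl = k := by omega
          simp [pvChain, pvBlock, hne, hgt]
        simp only [List.foldl_cons, h1, ih, h2]; simp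

-- ===== VERDICT (by name: the statement is the Claim_ definition above) =====
theorem build_nested_itemize_spec : Claim_equal_build_nested_itemize := by
  intro items _
  unfold Spec_build_nested_itemize build_nested_itemize build_nested_itemize_alt
  have h := pvMain items [] []
  simp only [pvChain] at h
  rw [h]
  simp
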